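-- pv_equiv track=rewrite | github.com/PeterReisNyman/PlayGround | Py/ai.py | what_thirds
-- ===== SOURCE A (Python) =====
-- thirds = [0,20,40,60]
--
-- def what_thirds(num):
--     result = []
--     for third in thirds:
--         if num >= third and num < third + 20:
--             result.append(1)
--         else:
--             result.append(0)
--     return result
-- ===== SOURCE B (Python) =====
-- def what_thirds(num):
--     result = [0, 0, 0, 0]
--     if 0 <= num < 80:
--         result[int(num // 20)] = 1
--     return result
-- ===== Notes on version B (the rewrite author's own statement) =====
-- stated objective: simpler
-- what changed: Replaced the loop that tests each threshold with a range comparison by a direct closed-form bucket-index division written into a pre-built zero list.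
import Mathlib
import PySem

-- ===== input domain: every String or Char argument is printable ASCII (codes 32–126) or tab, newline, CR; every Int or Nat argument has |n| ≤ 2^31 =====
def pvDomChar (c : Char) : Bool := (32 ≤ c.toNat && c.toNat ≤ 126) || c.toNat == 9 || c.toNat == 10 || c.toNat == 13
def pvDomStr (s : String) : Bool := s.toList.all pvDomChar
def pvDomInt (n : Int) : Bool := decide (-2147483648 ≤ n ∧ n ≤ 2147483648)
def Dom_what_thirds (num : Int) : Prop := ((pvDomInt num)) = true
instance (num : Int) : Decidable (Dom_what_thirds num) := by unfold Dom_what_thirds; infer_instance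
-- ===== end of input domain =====

-- B replaces A's scan over the four thresholds with a closed-form bucket index (num // 20) written into a zero list; objective: simpler.


-- ===== PORT A =====
-- transliteration of A: loop over thirds, append 1 or 0 per range test
def what_thirds (num : Int) : List Int :=
  ([0, 20, 40, 60] : List Int).foldl
    (fun result third =>
      if num ≥ third ∧ num < third + 20 then result ++ [1] else result ++ [0])
    []

-- ===== PORT B =====
-- B: closed-form bucket index written into a zero list (no loop)
def what_thirds_alt (num : Int) : List Int :=
  let result : List Int := [0, 0, 0, 0]
  if 0 ≤ num ∧ num < 80 then
    result.set (PySem.Int.floordiv num 20).toNat 1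
  else
    result

-- ===== PRECONDITION & SPEC =====
def Spec_what_thirds (num : Int) (out : List Int) : Prop := out = what_thirds_alt num
instance (num : Int) (out : List Int) : Decidable (Spec_what_thirds num out) := by unfold Spec_what_thirds; infer_instance

-- ===== CLAIM (what is proved, stated in full; the proofs are below) =====
def Claim_equal_what_thirds : Prop := ∀ (num : Int), Dom_what_thirds num → Spec_what_thirds num (what_thirds num)

-- ===== LEMMAS AND PROOFS =====

-- ===== VERDICT (by name: the statement is the Claim_ definition above) =====
theorem what_thirds_spec : Claim_equal_what_thirds := by
  intro num _
  unfold Spec_what_thirds what_thirds what_thirds_alt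
  simp only [List.foldl]
  by_cases h0 : num < 0
  · have hn : (0 ≤ num ∧ num < 80) = False := eq_false (by omega)
    have c0 : (num ≥ 0 ∧ num < 0+20) = False := eq_false (by omega)
    have c1 : (num ≥ 20 ∧ num < 20+20) = False := eq_false (by omega)
    have c2 : (num ≥ 40 ∧ num < 40+20) = False := eq_false (by omega)
    have c3 : (num ≥ 60 ∧ num < 60+20) = False := eq_false (by omega)
    simp only [hn, c0, c1, c2, c3, if_true, if_false]
    rfl
  · by_cases h1 : num < 20
    · have hd : PySem.Int.floordiv num 20 = 0 :=
        (PySem.Int.floordiv_eq_iff_of_pos (by omega)).mpr (by omega)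
      have hp : (0 ≤ num ∧ num < 80) := by omega
      have c0 : (num ≥ 0 ∧ num < 0+20) = True := eq_true ⟨by omega, by omega⟩
      have c1 : (num ≥ 20 ∧ num < 20+20) = False := eq_false (by omega)
      have c2 : (num ≥ 40 ∧ num < 40+20) = False := eq_false (by omega)
      have c3 : (num ≥ 60 ∧ num < 60+20) = False := eq_false (by omega)
      simp only [c0, c1, c2, c3, if_true, if_false]
      rw [if_pos hp, hd]
      rfl
    · by_cases h2 : num < 40
      · have hd : PySem.Int.floordiv num 20 = 1 :=
          (PySem.Int.floordiv_eq_iff_of_pos (by omega)).mpr (by omega)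
        have hp : (0 ≤ num ∧ num < 80) := by omega
        have c0 : (num ≥ 0 ∧ num < 0+20) = False := eq_false (by omega)
        have c1 : (num ≥ 20 ∧ num < 20+20) = True := eq_true ⟨by omega, by omega⟩
        have c2 : (num ≥ 40 ∧ num < 40+20) = False := eq_false (by omega)
        have c3 : (num ≥ 60 ∧ num < 60+20) = False := eq_false (by omega)
        simp only [c0, c1, c2, c3, if_true, if_false]
        rw [if_pos hp, hd]
        rfl
      · by_cases h3 : num < 60
        · have hd : PySem.Int.floordiv num 20 = 2 :=
            (PySem.Int.floordiv_eq_iff_of_pos (by omega)).mpr (by omega)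
          have hp : (0 ≤ num ∧ num < 80) := by omega
          have c0 : (num ≥ 0 ∧ num < 0+20) = False := eq_false (by omega)
          have c1 : (num ≥ 20 ∧ num < 20+20) = False := eq_false (by omega)
          have c2 : (num ≥ 40 ∧ num < 40+20) = True := eq_true ⟨by omega, by omega⟩
          have c3 : (num ≥ 60 ∧ num < 60+20) = False := eq_false (by omega)
          simp only [c0, c1, c2, c3, if_true, if_false]
          rw [if_pos hp, hd]
          rfl
        · by_cases h4 : num < 80
          · have hd : PySem.Int.floordiv num 20 = 3 :=
              (PySem.Int.floordiv_eq_iff_of_pos (by omega)).mpr (by omega)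
            have hp : (0 ≤ num ∧ num < 80) := by omega
            have c0 : (num ≥ 0 ∧ num < 0+20) = False := eq_false (by omega)
            have c1 : (num ≥ 20 ∧ num < 20+20) = False := eq_false (by omega)
            have c2 : (num ≥ 40 ∧ num < 40+20) = False := eq_false (by omega)
            have c3 : (num ≥ 60 ∧ num < 60+20) = True := eq_true ⟨by omega, by omega⟩
            simp only [c0, c1, c2, c3, if_true, if_false]
            rw [if_pos hp, hd]
            rfl
          · have hn : (0 ≤ num ∧ num < 80) = False := eq_false (by omega)
            have c0 : (num ≥ 0 ∧ num < 0+20) = False := eq_false (by omega)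
            have c1 : (num ≥ 20 ∧ num < 20+20) = False := eq_false (by omega)
            have c2 : (num ≥ 40 ∧ num < 40+20) = False := eq_false (by omega)
            have c3 : (num ≥ 60 ∧ num < 60+20) = False := eq_false (by omega)
            simp only [hn, c0, c1, c2, c3, if_true, if_false]
            rfl
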